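-- pv_equiv track=rewrite | github.com/mombasawalafaizan/dsa_solution | Greedy/maximum_trains_to_which_stoppage_can_be_provided.py | maxStop
-- ===== SOURCE A (Python) =====
-- class TrainInfo:
--     def __init__(self, arrival, departure):
--         self.arvl = arrival
--         self.dptr = departure
--
-- def maxStop(arr, n, p):
--     pltfrms = [[] for _ in range(p)]
--
--     for i in range(n):
--         pltfrms[arr[i][2]-1].append(TrainInfo(arr[i][0], arr[i][1]))
--
--     for i in range(p):
--         pltfrms[i].sort(key=lambda x: x.dptr)
--
--     stoppedTrains = 0
--
--     for i in range(p):
--         if len(pltfrms[i]) != 0: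
--             stoppedTrains += 1
--             idx = 0
--             for j in range(1, len(pltfrms[i])):
--                 if pltfrms[i][j].arvl >= pltfrms[i][idx].dptr:
--                     stoppedTrains += 1
--                     idx = j
--
--     return stoppedTrains
-- ===== SOURCE B (Python) =====
-- def maxStop(arr, n, p):
--     trains = sorted([(arr[i][0], arr[i][1], arr[i][2]) for i in range(n)],
--                     key=lambda t: t[1])
--     last = [None] * p
--     count = 0
--     for a, d, plat in trains:
--         prev = last[plat - 1]
--         if prev is None or a >= prev:
--             count += 1
--             last[plat - 1] = d
--     return count
-- ===== Notes on version B (the rewrite author's own statement) =====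
-- stated objective: simpler
-- what changed: Instead of distributing trains into p per-platform bucket lists, sorting each bucket and running a nested index-based greedy per bucket, B stable-sorts the whole train list once by departure time and does one flat pass keeping a last-departure slot per platform.
import Mathlib
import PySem

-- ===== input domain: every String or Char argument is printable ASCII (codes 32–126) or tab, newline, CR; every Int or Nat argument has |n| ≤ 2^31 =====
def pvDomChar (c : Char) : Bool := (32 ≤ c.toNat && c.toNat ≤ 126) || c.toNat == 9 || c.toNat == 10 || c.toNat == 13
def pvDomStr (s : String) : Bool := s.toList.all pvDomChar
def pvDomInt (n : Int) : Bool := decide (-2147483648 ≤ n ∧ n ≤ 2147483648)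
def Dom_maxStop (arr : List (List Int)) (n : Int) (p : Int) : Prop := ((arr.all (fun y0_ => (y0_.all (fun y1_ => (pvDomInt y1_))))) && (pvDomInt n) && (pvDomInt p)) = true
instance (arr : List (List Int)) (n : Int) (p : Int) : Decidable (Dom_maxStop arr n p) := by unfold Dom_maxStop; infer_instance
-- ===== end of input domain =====

-- B replaces A's group-into-buckets / sort-each-bucket / nested per-bucket greedy with ONE stable
-- sort of all trains by departure followed by ONE flat pass keeping a last-departure slot per
-- platform (objective: simpler; same asymptotic cost).

-- ===== PORT A =====
def maxStop (arr : List (List Int)) (n : Int) (p : Int) : Int :=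
  -- pltfrms = [[] for _ in range(p)]
  let pltfrms0 : List (List (Int × Int)) := (PySem.List.pyRange 0 p 1).map (fun _ => [])
  -- for i in range(n): pltfrms[arr[i][2]-1].append(TrainInfo(arr[i][0], arr[i][1]))
  let pltfrms1 := (PySem.List.pyRange 0 n 1).foldl (fun plt i =>
    let row := PySem.List.pyGetD arr i []
    PySem.List.pySetD plt (PySem.List.pyGetD row 2 0 - 1)
      (PySem.List.pyGetD plt (PySem.List.pyGetD row 2 0 - 1) [] ++
        [(PySem.List.pyGetD row 0 0, PySem.List.pyGetD row 1 0)])) pltfrms0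
  -- for i in range(p): pltfrms[i].sort(key=lambda x: x.dptr)
  -- (len(pltfrms) == max(p,0) always, so this index loop updates each slot in place once: a map)
  let pltfrms2 := pltfrms1.map (fun l => PySem.List.sorted l (fun t => t.2))
  -- stoppedTrains = 0; for i in range(p): …  (again range(p) enumerates exactly the slots)
  pltfrms2.foldl (fun s l =>
    if l.length ≠ 0 then
      ((PySem.List.pyRange 1 (PySem.List.len l) 1).foldl (fun st j =>
        if (PySem.List.pyGetD l j (0, 0)).1 ≥ (PySem.List.pyGetD l st.2 (0, 0)).2
        then (st.1 + 1, j) else st) (s + 1, (0 : Int))).1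
    else s) 0

-- ===== PORT B =====
def maxStop_alt (arr : List (List Int)) (n : Int) (p : Int) : Int :=
  -- trains = sorted([(arr[i][0], arr[i][1], arr[i][2]) for i in range(n)], key=lambda t: t[1])
  let trains := PySem.List.sorted ((PySem.List.pyRange 0 n 1).map (fun i =>
      let row := PySem.List.pyGetD arr i []
      (PySem.List.pyGetD row 0 0, PySem.List.pyGetD row 1 0, PySem.List.pyGetD row 2 0)))
    (fun t => t.2.1)
  -- last = [None] * p; count = 0; for a, d, plat in trains: …
  (trains.foldl (fun st t =>
      match PySem.List.pyGetD st.2 (t.2.2 - 1) none with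
      | none => (st.1 + 1, PySem.List.pySetD st.2 (t.2.2 - 1) (some t.2.1))
      | some prev =>
        if t.1 ≥ prev then (st.1 + 1, PySem.List.pySetD st.2 (t.2.2 - 1) (some t.2.1))
        else st)
    ((0 : Int), PySem.List.pyRepeat [(none : Option Int)] p)).1

-- ===== PRECONDITION & SPEC =====
-- Pre_ excludes exactly the inputs where Python A raises IndexError: range(n) must stay inside arr,
-- each visited row needs at least 3 entries, and each platform index arr[i][2]-1 must be a valid
-- (possibly negative, Python-wrapping) index into the p platform slots.
def Pre_maxStop (arr : List (List Int)) (n : Int) (p : Int) : Prop :=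
  n.toNat ≤ arr.length ∧
    ∀ i : Nat, i < n.toNat →
      2 < (arr.getD i []).length ∧
        PySem.Raise.InRange p.toNat ((arr.getD i []).getD 2 0 - 1)
instance (arr : List (List Int)) (n : Int) (p : Int) : Decidable (Pre_maxStop arr n p) := by
  unfold Pre_maxStop; infer_instance
def pvWitness_maxStop : List (List Int) × Int × Int := ([[1, 3, 1], [2, 4, 1]], 2, 1)

def Spec_maxStop (arr : List (List Int)) (n : Int) (p : Int) (out : Int) : Prop := out = maxStop_alt arr n p
instance (arr : List (List Int)) (n : Int) (p : Int) (out : Int) : Decidable (Spec_maxStop arr n p out) := by unfold Spec_maxStop; infer_instance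

-- ===== CLAIM (what is proved, stated in full; the proofs are below) =====
def Claim_equal_maxStop : Prop := ∀ (arr : List (List Int)) (n : Int) (p : Int), Dom_maxStop arr n p → Pre_maxStop arr n p → Spec_maxStop arr n p (maxStop arr n p)

-- ===== LEMMAS AND PROOFS =====

-- normalised (wrapped) index for a Python list access xs[j] with InRange j
def pvNorm (len : Nat) (j : Int) : Nat := if 0 ≤ j then j.toNat else len - (-j).toNat

theorem pvIdx_eq (len : Nat) (j : Int) (h : PySem.Raise.InRange len j) :
    PySem.List.pyIdx? len j = some (pvNorm len j) := by
  obtain ⟨h1, h2⟩ := h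
  simp only [PySem.List.pyIdx?, pvNorm]
  split_ifs <;> simp only [Option.some.injEq] <;> omega

theorem pvNorm_lt (len : Nat) (j : Int) (h : PySem.Raise.InRange len j) : pvNorm len j < len := by
  obtain ⟨h1, h2⟩ := h
  simp only [pvNorm]; split_ifs with ha <;> omega

theorem pvGetD_norm {α : Type} (xs : List α) (j : Int) (d : α)
    (h : PySem.Raise.InRange xs.length j) :
    PySem.List.pyGetD xs j d = xs.getD (pvNorm xs.length j) d := by
  simp only [PySem.List.pyGetD, PySem.List.pyGet?, pvIdx_eq _ _ h, Option.bind_some,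
    List.getD_eq_getElem?_getD]

theorem pvSetD_norm {α : Type} (xs : List α) (j : Int) (v : α)
    (h : PySem.Raise.InRange xs.length j) :
    PySem.List.pySetD xs j v = xs.set (pvNorm xs.length j) v := by
  simp only [PySem.List.pySetD, PySem.List.pySet?, pvIdx_eq _ _ h, Option.map_some, Option.getD_some]

theorem pvGetD_set_self {α : Type} (l : List α) (i : Nat) (v d : α) (h : i < l.length) :
    (l.set i v).getD i d = v := by
  simp [List.getD_eq_getElem?_getD, List.getElem?_set, h]

theorem pvGetD_set_ne {α : Type} (l : List α) (i k : Nat) (v d : α) (h : k ≠ i) :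
    (l.set i v).getD k d = l.getD k d := by
  simp [List.getD_eq_getElem?_getD, List.getElem?_set, Ne.symm h]

theorem pvGetD_replicate {α : Type} (n k : Nat) (v d : α) :
    (List.replicate n v).getD k d = if k < n then v else d := by
  simp [List.getD_eq_getElem?_getD, List.getElem?_replicate]; split_ifs <;> simp

-- the list of train triples (arvl, dptr, platform) that both programs read, in input order
def pvTrip (arr : List (List Int)) (i : Int) : Int × Int × Int :=
  (PySem.List.pyGetD (PySem.List.pyGetD arr i []) 0 0,
   PySem.List.pyGetD (PySem.List.pyGetD arr i []) 1 0,
   PySem.List.pyGetD (PySem.List.pyGetD arr i []) 2 0)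
def pvTrains (arr : List (List Int)) (n : Int) : List (Int × Int × Int) :=
  (PySem.List.pyRange 0 n 1).map (pvTrip arr)

def pvPidx (P : Nat) (t : Int × Int × Int) : Nat := pvNorm P (t.2.2 - 1)
def pvProj (t : Int × Int × Int) : Int × Int := (t.1, t.2.1)

-- greedy count given the last stopped departure (none = platform still empty)
def pvG : Option Int → List (Int × Int) → Int
  | _, [] => 0
  | none, t :: r => 1 + pvG (some t.2) r
  | some x, t :: r => if t.1 ≥ x then 1 + pvG (some t.2) r else pvG (some x) r


-- append step of the insertion sort underlying PySem.List.sorted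
theorem sorted_append_singleton {α κ : Type} [LT κ] [DecidableLT κ] (xs : List α) (x : α) (key : α → κ) :
    PySem.List.sorted (xs ++ [x]) key =
      PySem.List.insertBy (fun a b => decide (key a < key b)) x (PySem.List.sorted xs key) := by
  simp [PySem.List.sorted_eq_foldl_insertBy, List.foldl_append]

-- filtering commutes with inserting into a key-sorted list
theorem filter_insertBy {α κ : Type} [LinearOrder κ] (q : α → Bool) (key : α → κ) (x : α) :
    ∀ (ys : List α), ys.Pairwise (fun a b => key a ≤ key b) →
      (PySem.List.insertBy (fun a b => decide (key a < key b)) x ys).filter q =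
        if q x then PySem.List.insertBy (fun a b => decide (key a < key b)) x (ys.filter q)
        else ys.filter q := by
  intro ys
  induction ys with
  | nil => intro _; simp [PySem.List.insertBy]; split_ifs <;> simp_all
  | cons y ys ih =>
    intro hp
    have hp' := (List.pairwise_cons.mp hp).2
    have hy : ∀ z ∈ ys, key y ≤ key z := (List.pairwise_cons.mp hp).1
    by_cases hlt : key x < key y
    · -- x goes in front of y
      have hfront : ∀ z ∈ ys.filter q, decide (key x < key z) = true := by
        intro z hz
        simp only [decide_eq_true_eq]
        exact lt_of_lt_of_le hlt (hy z (List.mem_of_mem_filter hz))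
      simp only [PySem.List.insertBy, hlt, decide_true, if_true]
      by_cases hqy : q y
      · by_cases hqx : q x <;> simp [List.filter_cons, hqy, hqx, PySem.List.insertBy, hlt]
      · by_cases hqx : q x
        · simp only [List.filter_cons, hqy, hqx, if_true]
          cases hys : ys.filter q with
          | nil => simp [hys, PySem.List.insertBy, hqx, hqy, List.filter_cons]
          | cons z zs =>
            have := hfront z (by rw [hys]; exact List.mem_cons_self)
            simp [hys, PySem.List.insertBy, this, hqx, hqy, List.filter_cons]
        · simp [List.filter_cons, hqy, hqx]
    · -- x goes after y
      simp only [PySem.List.insertBy, hlt, decide_false, Bool.false_eq_true, if_false]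
      rw [List.filter_cons, List.filter_cons]
      by_cases hqy : q y
      · simp only [hqy, if_true]
        rw [ih hp']
        by_cases hqx : q x
        · simp [hqx, PySem.List.insertBy, hlt]
        · simp [hqx]
      · simp only [hqy, if_false]
        exact ih hp'
-- filtering commutes with the stable sort
theorem filter_sorted {α κ : Type} [LinearOrder κ] (q : α → Bool) (key : α → κ) (L : List α) :
    (PySem.List.sorted L key).filter q = PySem.List.sorted (L.filter q) key := by
  induction L using List.reverseRecOn with
  | nil => simp [PySem.List.sorted]
  | append_singleton xs x ih =>
    rw [sorted_append_singleton, filter_insertBy q key x _ (PySem.List.sorted_pairwise xs key),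
      List.filter_append]
    by_cases hqx : q x
    · simp [hqx, sorted_append_singleton, ih]
    · simp [hqx, ih]

-- mapping a key-preserving projection commutes with insertBy and with the sort
theorem map_insertBy {α β κ : Type} [LT κ] [DecidableLT κ] (f : α → β) (key : β → κ) (x : α) :
    ∀ (ys : List α),
      (PySem.List.insertBy (fun a b => decide (key (f a) < key (f b))) x ys).map f =
        PySem.List.insertBy (fun a b => decide (key a < key b)) (f x) (ys.map f) := by
  intro ys
  induction ys with
  | nil => simp [PySem.List.insertBy]
  | cons y ys ih =>
    simp only [PySem.List.insertBy, List.map_cons]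
    by_cases h : key (f x) < key (f y) <;> simp [h, PySem.List.insertBy, ih]

theorem map_sorted {α β κ : Type} [LT κ] [DecidableLT κ] (f : α → β) (key : β → κ) (L : List α) :
    (PySem.List.sorted L (fun a => key (f a))).map f = PySem.List.sorted (L.map f) key := by
  induction L using List.reverseRecOn with
  | nil => simp [PySem.List.sorted]
  | append_singleton xs x ih =>
    simp only [List.map_append, List.map_cons, List.map_nil]
    rw [sorted_append_singleton (key := key), ← ih, sorted_append_singleton, map_insertBy]

-- A's bucket-filling loop puts train t into bucket pvPidx
def pvBStep (plt : List (List (Int × Int))) (t : Int × Int × Int) : List (List (Int × Int)) :=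
  PySem.List.pySetD plt (t.2.2 - 1)
    (PySem.List.pyGetD plt (t.2.2 - 1) [] ++ [(t.1, t.2.1)])

theorem bucket_foldl (P : Nat) (L : List (Int × Int × Int))
    (hL : ∀ t ∈ L, PySem.Raise.InRange P (t.2.2 - 1)) :
    ∀ (plt : List (List (Int × Int))), plt.length = P →
      (L.foldl pvBStep plt).length = P ∧
      ∀ k, k < P → (L.foldl pvBStep plt).getD k [] =
        plt.getD k [] ++ (L.filter (fun t => pvPidx P t == k)).map pvProj := by
  induction L with
  | nil => intro plt h; exact ⟨h, by simp⟩
  | cons t R ih =>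
    intro plt hlen
    have hin : PySem.Raise.InRange P (t.2.2 - 1) := hL t List.mem_cons_self
    have hin' : PySem.Raise.InRange plt.length (t.2.2 - 1) := by rw [hlen]; exact hin
    have hi : pvPidx P t < P := pvNorm_lt _ _ hin
    have hstep : pvBStep plt t = plt.set (pvPidx P t) (plt.getD (pvPidx P t) [] ++ [(t.1, t.2.1)]) := by
      simp only [pvBStep, pvSetD_norm _ _ _ hin', pvGetD_norm _ _ _ hin', pvPidx, hlen]
    have hlen' : (plt.set (pvPidx P t) (plt.getD (pvPidx P t) [] ++ [(t.1, t.2.1)])).length = P := by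
      simp [hlen]
    obtain ⟨ihlen, ihget⟩ := ih (fun u hu => hL u (List.mem_cons_of_mem _ hu)) _ hlen'
    rw [List.foldl_cons, hstep]
    refine ⟨ihlen, fun k hk => ?_⟩
    rw [ihget k hk, List.filter_cons]
    by_cases hki : pvPidx P t = k
    · subst hki
      rw [pvGetD_set_self _ _ _ _ (by omega)]
      simp [pvProj, List.append_assoc]
    · rw [pvGetD_set_ne _ _ _ _ _ (Ne.symm hki)]
      simp [hki]

-- A's inner greedy loop over indices computes pvG on the tail
def pvIStep (l : List (Int × Int)) (st : Int × Int) (j : Int) : Int × Int :=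
  if (PySem.List.pyGetD l j (0, 0)).1 ≥ (PySem.List.pyGetD l st.2 (0, 0)).2 then (st.1 + 1, j) else st

theorem inner_eq (l : List (Int × Int)) :
    ∀ (c a m : Nat) (_ : m < l.length) (_ : m < a) (_ : a + c = l.length) (s : Int),
      ((PySem.List.pyRange (a : Int) (l.length : Int) 1).foldl (pvIStep l) (s, (m : Int))).1
        = s + pvG (some (l.getD m (0, 0)).2) (l.drop a) := by
  intro c
  induction c with
  | zero =>
    intro a m hm hma ha s
    have h2 : l.drop a = [] := List.drop_of_length_le (by omega)
    rw [PySem.List.pyRange_one_eq_nil (by omega), List.foldl_nil, h2]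
    simp [pvG]
  | succ c ih =>
    intro a m hm hma ha s
    have halt : a < l.length := by omega
    rw [PySem.List.pyRange_one_cons (by exact_mod_cast by omega : (a : Int) < (l.length : Int))]
    rw [List.foldl_cons]
    have hcast : ((a : Int) + 1) = (((a + 1 : Nat)) : Int) := by push_cast; ring
    have hdrop : l.drop a = l[a] :: l.drop (a + 1) := List.drop_eq_getElem_cons halt
    have hga : PySem.List.pyGetD l (a : Int) (0, 0) = l[a] := by
      rw [PySem.List.pyGetD_natCast]
      exact List.getD_eq_getElem l (0, 0) halt
    have hgm : PySem.List.pyGetD l (m : Int) (0, 0) = l.getD m (0, 0) :=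
      PySem.List.pyGetD_natCast l m (0, 0)
    by_cases hacc : (PySem.List.pyGetD l (a : Int) (0, 0)).1 ≥ (PySem.List.pyGetD l (m : Int) (0, 0)).2
    · rw [show pvIStep l (s, (m : Int)) (a : Int) = (s + 1, (a : Int)) by
        simp only [pvIStep]; rw [if_pos hacc]]
      rw [hcast, ih (a + 1) a halt (by omega) (by omega) (s + 1)]
      rw [hdrop, List.getD_eq_getElem _ _ halt]
      have : pvG (some (l.getD m (0, 0)).2) (l[a] :: l.drop (a + 1))
          = 1 + pvG (some l[a].2) (l.drop (a + 1)) := by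
        simp only [pvG]
        rw [if_pos]
        rw [hga, hgm] at hacc
        exact hacc
      rw [this]
      ring
    · rw [show pvIStep l (s, (m : Int)) (a : Int) = (s, (m : Int)) by
        simp only [pvIStep]; rw [if_neg hacc]]
      rw [hcast, ih (a + 1) m hm (by omega) (by omega) s]
      rw [hdrop]
      have : pvG (some (l.getD m (0, 0)).2) (l[a] :: l.drop (a + 1))
          = pvG (some (l.getD m (0, 0)).2) (l.drop (a + 1)) := by
        simp only [pvG]
        rw [if_neg]
        rw [hga, hgm] at hacc
        exact fun h => hacc h
      rw [this]

-- A's per-bucket body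
def pvCnt (s : Int) (l : List (Int × Int)) : Int :=
  if l.length ≠ 0 then
    ((PySem.List.pyRange 1 (PySem.List.len l) 1).foldl (pvIStep l) (s + 1, (0 : Int))).1
  else s

theorem cnt_eq (s : Int) (l : List (Int × Int)) : pvCnt s l = s + pvG none l := by
  cases l with
  | nil => simp [pvCnt, pvG]
  | cons x r =>
    simp only [pvCnt, PySem.List.len_eq]
    rw [if_pos (by simp)]
    have h := inner_eq (x :: r) r.length 1 0 (by simp) (by omega) (by simp; omega) (s + 1)
    simp only [Nat.cast_one, Nat.cast_zero] at h
    rw [h]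
    simp [pvG]
    ring

theorem sum_map_eq_range {α : Type} (l : List α) (f : α → Int) (d : α) :
    (l.map f).sum = ∑ k ∈ Finset.range l.length, f (l.getD k d) := by
  induction l with
  | nil => simp
  | cons x r ih =>
    rw [List.map_cons, List.sum_cons, List.length_cons, Finset.sum_range_succ']
    simp only [List.getD_cons_succ, List.getD_cons_zero]
    rw [ih]
    ring

-- B's flat pass step
def pvFStep (st : Int × List (Option Int)) (t : Int × Int × Int) : Int × List (Option Int) :=
  match PySem.List.pyGetD st.2 (t.2.2 - 1) none with
  | none => (st.1 + 1, PySem.List.pySetD st.2 (t.2.2 - 1) (some t.2.1))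
  | some prev =>
    if t.1 ≥ prev then (st.1 + 1, PySem.List.pySetD st.2 (t.2.2 - 1) (some t.2.1)) else st

theorem flat_eq (P : Nat) :
    ∀ (L : List (Int × Int × Int)), (∀ t ∈ L, PySem.Raise.InRange P (t.2.2 - 1)) →
    ∀ (c : Int) (last : List (Option Int)), last.length = P →
      (L.foldl pvFStep (c, last)).1 =
        c + ∑ k ∈ Finset.range P,
          pvG (last.getD k none) ((L.filter (fun t => pvPidx P t == k)).map pvProj) := by
  intro L
  induction L with
  | nil => intro _ c last _; simp [pvG]
  | cons t R ih =>
    intro hL c last hlen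
    have hin : PySem.Raise.InRange P (t.2.2 - 1) := hL t List.mem_cons_self
    have hin' : PySem.Raise.InRange last.length (t.2.2 - 1) := by rw [hlen]; exact hin
    have hi : pvPidx P t < P := pvNorm_lt _ _ hin
    have hget : PySem.List.pyGetD last (t.2.2 - 1) none = last.getD (pvPidx P t) none := by
      rw [pvGetD_norm _ _ _ hin']; simp [pvPidx, hlen]
    have hset : PySem.List.pySetD last (t.2.2 - 1) (some t.2.1)
        = last.set (pvPidx P t) (some t.2.1) := by
      rw [pvSetD_norm _ _ _ hin']; simp [pvPidx, hlen]
    have hR := fun u hu => hL u (List.mem_cons_of_mem _ hu)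
    have hmem : pvPidx P t ∈ Finset.range P := Finset.mem_range.mpr hi
    have hsplit : ∀ (g : Nat → Int), ∑ k ∈ Finset.range P, g k
        = g (pvPidx P t) + ∑ k ∈ (Finset.range P).erase (pvPidx P t), g k :=
      fun g => (Finset.add_sum_erase _ g hmem).symm
    have hfilter_eq : ∀ k, k ≠ pvPidx P t →
        ((t :: R).filter (fun u => pvPidx P u == k)) = R.filter (fun u => pvPidx P u == k) := by
      intro k hk
      rw [List.filter_cons, if_neg (by simp [Ne.symm hk])]
    have hfilter_self : ((t :: R).filter (fun u => pvPidx P u == pvPidx P t))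
        = t :: R.filter (fun u => pvPidx P u == pvPidx P t) := by
      rw [List.filter_cons, if_pos (by simp)]
    rw [List.foldl_cons]
    cases hprev : PySem.List.pyGetD last (t.2.2 - 1) none with
    | none =>
      rw [show pvFStep (c, last) t = (c + 1, PySem.List.pySetD last (t.2.2 - 1) (some t.2.1)) by
        simp only [pvFStep, hprev]]
      rw [hset, ih hR (c + 1) _ (by simp [hlen])]
      rw [hsplit (fun k => pvG (last.getD k none) (((t :: R).filter (fun u => pvPidx P u == k)).map pvProj)),
        hsplit (fun k => pvG ((last.set (pvPidx P t) (some t.2.1)).getD k none) ((R.filter (fun u => pvPidx P u == k)).map pvProj))]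
      have herase : ∑ k ∈ (Finset.range P).erase (pvPidx P t),
            pvG (last.getD k none) (((t :: R).filter (fun u => pvPidx P u == k)).map pvProj)
          = ∑ k ∈ (Finset.range P).erase (pvPidx P t),
            pvG ((last.set (pvPidx P t) (some t.2.1)).getD k none) ((R.filter (fun u => pvPidx P u == k)).map pvProj) := by
        refine Finset.sum_congr rfl fun k hk => ?_
        have hkne : k ≠ pvPidx P t := (Finset.mem_erase.mp hk).1
        rw [hfilter_eq k hkne, pvGetD_set_ne _ _ _ _ _ hkne]
      have hself : pvG (last.getD (pvPidx P t) none) (((t :: R).filter (fun u => pvPidx P u == pvPidx P t)).map pvProj)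
          = 1 + pvG ((last.set (pvPidx P t) (some t.2.1)).getD (pvPidx P t) none)
              ((R.filter (fun u => pvPidx P u == pvPidx P t)).map pvProj) := by
        rw [hget] at hprev
        rw [hprev, hfilter_self, List.map_cons, pvGetD_set_self _ _ _ _ (by omega)]
        simp [pvG, pvProj]
      rw [herase, hself]
      ring
    | some prev =>
      by_cases hacc : t.1 ≥ prev
      · rw [show pvFStep (c, last) t = (c + 1, PySem.List.pySetD last (t.2.2 - 1) (some t.2.1)) by
          simp only [pvFStep, hprev]; rw [if_pos hacc]]
        rw [hset, ih hR (c + 1) _ (by simp [hlen])]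
        rw [hsplit (fun k => pvG (last.getD k none) (((t :: R).filter (fun u => pvPidx P u == k)).map pvProj)),
          hsplit (fun k => pvG ((last.set (pvPidx P t) (some t.2.1)).getD k none) ((R.filter (fun u => pvPidx P u == k)).map pvProj))]
        have herase : ∑ k ∈ (Finset.range P).erase (pvPidx P t),
              pvG (last.getD k none) (((t :: R).filter (fun u => pvPidx P u == k)).map pvProj)
            = ∑ k ∈ (Finset.range P).erase (pvPidx P t),
              pvG ((last.set (pvPidx P t) (some t.2.1)).getD k none) ((R.filter (fun u => pvPidx P u == k)).map pvProj) := by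
          refine Finset.sum_congr rfl fun k hk => ?_
          have hkne : k ≠ pvPidx P t := (Finset.mem_erase.mp hk).1
          rw [hfilter_eq k hkne, pvGetD_set_ne _ _ _ _ _ hkne]
        have hself : pvG (last.getD (pvPidx P t) none) (((t :: R).filter (fun u => pvPidx P u == pvPidx P t)).map pvProj)
            = 1 + pvG ((last.set (pvPidx P t) (some t.2.1)).getD (pvPidx P t) none)
                ((R.filter (fun u => pvPidx P u == pvPidx P t)).map pvProj) := by
          rw [hget] at hprev
          rw [hprev, hfilter_self, List.map_cons, pvGetD_set_self _ _ _ _ (by omega)]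
          simp [pvG, pvProj, hacc]
        rw [herase, hself]
        ring
      · rw [show pvFStep (c, last) t = (c, last) by
          simp only [pvFStep, hprev]; rw [if_neg hacc]]
        rw [ih hR c last hlen]
        congr 1
        refine Finset.sum_congr rfl fun k hk => ?_
        by_cases hkne : k = pvPidx P t
        · subst hkne
          rw [hget] at hprev
          rw [hprev, hfilter_self, List.map_cons]
          simp [pvG, pvProj, hacc]
        · rw [hfilter_eq k hkne]

theorem trains_inrange (arr : List (List Int)) (n p : Int) (hpre : Pre_maxStop arr n p) :
    ∀ t ∈ pvTrains arr n, PySem.Raise.InRange p.toNat (t.2.2 - 1) := by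
  intro t ht
  simp only [pvTrains, List.mem_map] at ht
  obtain ⟨i, hi, rfl⟩ := ht
  rw [PySem.List.mem_pyRange_one] at hi
  obtain ⟨h0, hn⟩ := hi
  have hlt : i.toNat < arr.length := by
    have := hpre.1
    omega
  obtain ⟨hrow, hr⟩ := hpre.2 i.toNat (by omega)
  have hrow_eq : PySem.List.pyGetD arr i [] = arr.getD i.toNat [] := by
    rw [pvGetD_norm _ _ _ ⟨by omega, by omega⟩]
    simp [pvNorm, h0]
  have h2 : (pvTrip arr i).2.2 = (arr.getD i.toNat []).getD 2 0 := by
    simp only [pvTrip, hrow_eq]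
    rw [pvGetD_norm _ _ _ ⟨by omega, by exact_mod_cast by omega⟩]
    simp [pvNorm]
  rw [h2]
  exact hr

theorem maxStop_spec : Claim_equal_maxStop := by
  unfold Claim_equal_maxStop
  intro arr n p _ hpre
  unfold Spec_maxStop
  by_cases hp : p < 0
  · -- p < 0: A's range(p) loops are empty; Pre_ forces n ≤ 0 so B has no trains either
    have hn : n ≤ 0 := by
      by_contra hn
      push_neg at hn
      obtain ⟨_, ha, hb⟩ := hpre.2 0 (by omega)
      omega
    have hA : maxStop arr n p = 0 := by
      unfold maxStop
      rw [PySem.List.pyRange_one_eq_nil (show (p : Int) ≤ 0 by omega),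
        PySem.List.pyRange_one_eq_nil (show (n : Int) ≤ 0 by omega)]
      simp
    have hB : maxStop_alt arr n p = 0 := by
      unfold maxStop_alt
      rw [PySem.List.pyRange_one_eq_nil (show (n : Int) ≤ 0 by omega)]
      simp [PySem.List.sorted]
    rw [hA, hB]
  · -- main case: 0 ≤ p
    have hp0 : (0 : Int) ≤ p := by omega
    have hP : ((p.toNat : Nat) : Int) = p := Int.toNat_of_nonneg hp0
    have hT := trains_inrange arr n p hpre
    -- A, written with the proof-side names (definitional unfolding of the port)
    have e1 : maxStop arr n p =
        (((PySem.List.pyRange 0 n 1).foldl (fun plt i => pvBStep plt (pvTrip arr i))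
            ((PySem.List.pyRange 0 p 1).map (fun _ => []))).map
          (fun l => PySem.List.sorted l (fun t => t.2))).foldl pvCnt 0 := rfl
    have e2 : maxStop_alt arr n p =
        ((PySem.List.sorted (pvTrains arr n) (fun t => t.2.1)).foldl pvFStep
          ((0 : Int), PySem.List.pyRepeat [(none : Option Int)] p)).1 := rfl
    -- name the intermediate A-side lists
    set plt0 : List (List (Int × Int)) := (PySem.List.pyRange 0 p 1).map (fun _ => []) with hplt0
    have h0len : plt0.length = p.toNat := by
      simp [hplt0, PySem.List.length_pyRange_one]
    have h0get : ∀ k : Nat, plt0.getD k [] = [] := by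
      intro k
      rcases lt_or_ge k plt0.length with h | h
      · rw [List.getD_eq_getElem _ _ h]
        simp [hplt0]
      · rw [List.getD_eq_default _ _ h]
    set plt1 : List (List (Int × Int)) :=
      (PySem.List.pyRange 0 n 1).foldl (fun plt i => pvBStep plt (pvTrip arr i)) plt0 with hplt1
    have hplt1' : plt1 = (pvTrains arr n).foldl pvBStep plt0 := by
      rw [hplt1, pvTrains, List.foldl_map]
    obtain ⟨h1len, h1get⟩ := bucket_foldl p.toNat (pvTrains arr n) hT plt0 h0len
    rw [← hplt1'] at h1len h1get
    set plt2 : List (List (Int × Int)) :=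
      plt1.map (fun l => PySem.List.sorted l (fun t => t.2)) with hplt2
    have hplt2' : plt2 = plt1.map (fun l => PySem.List.sorted l (fun t => t.2)) := hplt2
    have h2len : plt2.length = p.toNat := by
      rw [hplt2', List.length_map, h1len]
    -- collapse A's outer loop into a sum over the buckets
    have eA : maxStop arr n p = ∑ k ∈ Finset.range p.toNat, pvG none (plt2.getD k []) := by
      rw [e1]
      rw [PySem.List.foldl_congr_mem plt2 pvCnt (fun s l => s + pvG none l) 0
        (fun acc x _ => cnt_eq acc x)]
      rw [PySem.List.foldl_add plt2 (pvG none) 0, zero_add]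
      rw [sum_map_eq_range plt2 (pvG none) [], h2len]
    -- each bucket is the sorted, projected fibre of the train list
    have hbucket : ∀ k, k < p.toNat → plt2.getD k [] =
        ((PySem.List.sorted (pvTrains arr n) (fun t => t.2.1)).filter
          (fun t => pvPidx p.toNat t == k)).map pvProj := by
      intro k hk
      have hk2 : k < plt2.length := by omega
      rw [hplt2'] at hk2 ⊢
      rw [PySem.List.getD_map_of_lt _ _ _ _ (by simpa using hk2)]
      rw [show plt1[k]'(by simpa using hk2) = plt1.getD k [] from
        (List.getD_eq_getElem _ _ (by simpa using hk2)).symm]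
      rw [h1get k hk, h0get k, List.nil_append]
      have hms := map_sorted pvProj (fun t : Int × Int => t.2)
        ((pvTrains arr n).filter (fun t => pvPidx p.toNat t == k))
      simp only [pvProj] at hms
      rw [← hms, ← filter_sorted]
    -- collapse B's flat pass into the same sum
    have hT' : ∀ t ∈ PySem.List.sorted (pvTrains arr n) (fun t => t.2.1),
        PySem.Raise.InRange p.toNat (t.2.2 - 1) := by
      intro t ht
      exact hT t ((PySem.List.sorted_perm (pvTrains arr n) (fun t => t.2.1) false).mem_iff.mp ht)
    have eB : maxStop_alt arr n p = ∑ k ∈ Finset.range p.toNat,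
        pvG none (((PySem.List.sorted (pvTrains arr n) (fun t => t.2.1)).filter
          (fun t => pvPidx p.toNat t == k)).map pvProj) := by
      rw [e2, PySem.List.pyRepeat_singleton]
      rw [flat_eq p.toNat _ hT' 0 _ (List.length_replicate)]
      rw [zero_add]
      refine Finset.sum_congr rfl fun k hk => ?_
      rw [pvGetD_replicate]
      split_ifs <;> rfl
    rw [eA, eB]
    exact Finset.sum_congr rfl fun k hk => by rw [hbucket k (Finset.mem_range.mp hk)]
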